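-- pv_equiv track=rewrite | github.com/Netflix/repokid | repokid/utils/roledata.py | _filter_scheduled_repoable_perms
-- ===== SOURCE A (Python) =====
-- from typing import List
-- from typing import Set
-- from typing import Tuple
--
-- def _convert_repoed_service_to_sorted_perms_and_services(
--     repoed_services: Set[str],
-- ) -> Tuple[List[str], List[str]]:
--     """
--     Repokid stores a field RepoableServices that historically only stored services (when Access Advisor was only data).
--     Now this field is repurposed to store both services and permissions.  We can tell the difference because permissions
--     always have the form <service>:<permission>.  This function splits the contents of the field to sorted sets of
--     repoable services and permissions.
--
--     Args:
--         repoed_services (list): List from Dynamo of repoable services and permissions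
--
--     Returns:
--         list: Sorted list of repoable permissions (where there are other permissions that aren't repoed)
--         list: Sorted list of repoable services (where the entire service is removed)
--     """
--     repoable_permissions = set()
--     repoable_services = set()
--
--     for entry in repoed_services:
--         if len(entry.split(":")) == 2:
--             repoable_permissions.add(entry)
--         else:
--             repoable_services.add(entry)
--
--     return sorted(repoable_permissions), sorted(repoable_services)
--
-- def _filter_scheduled_repoable_perms(
--     repoable_permissions: Set[str], scheduled_perms: Set[str]
-- ) -> List[str]:
--     """
--     Take a list of current repoable permissions and filter out any that weren't in the list of scheduled permissions
--
--     Args: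
--         repoable_permissions (list): List of expanded permissions that are currently believed repoable
--         scheduled_perms (list): List of scheduled permissions and services (stored in Dynamo at schedule time)
--     Returns:
--         list: New (filtered) repoable permissions
--     """
--     (
--         scheduled_permissions,
--         scheduled_services,
--     ) = _convert_repoed_service_to_sorted_perms_and_services(scheduled_perms)
--     filtered = [
--         perm
--         for perm in repoable_permissions
--         if (perm in scheduled_permissions or perm.split(":")[0] in scheduled_services)
--     ]
--     return sorted(filtered)
-- ===== SOURCE B (Python) =====
-- def _filter_scheduled_repoable_perms(repoable_permissions, scheduled_perms):
--     # Single pass: classify each candidate by its own shape instead of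
--     # pre-partitioning the scheduled set into permission/service index lists.
--     return sorted(
--         perm
--         for perm in repoable_permissions
--         if perm.split(":")[0] in scheduled_perms
--         or (len(perm.split(":")) == 2 and perm in scheduled_perms)
--     )
-- ===== Notes on version B (the rewrite author's own statement) =====
-- stated objective: simpler
-- what changed: B drops the helper and its partitioning pass entirely: instead of building two sorted index lists (scheduled permissions vs services) and scanning them per candidate, B is a single comprehension that classifies each candidate by its own shape and tests it directly against scheduled_perms.
import Mathlib
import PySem

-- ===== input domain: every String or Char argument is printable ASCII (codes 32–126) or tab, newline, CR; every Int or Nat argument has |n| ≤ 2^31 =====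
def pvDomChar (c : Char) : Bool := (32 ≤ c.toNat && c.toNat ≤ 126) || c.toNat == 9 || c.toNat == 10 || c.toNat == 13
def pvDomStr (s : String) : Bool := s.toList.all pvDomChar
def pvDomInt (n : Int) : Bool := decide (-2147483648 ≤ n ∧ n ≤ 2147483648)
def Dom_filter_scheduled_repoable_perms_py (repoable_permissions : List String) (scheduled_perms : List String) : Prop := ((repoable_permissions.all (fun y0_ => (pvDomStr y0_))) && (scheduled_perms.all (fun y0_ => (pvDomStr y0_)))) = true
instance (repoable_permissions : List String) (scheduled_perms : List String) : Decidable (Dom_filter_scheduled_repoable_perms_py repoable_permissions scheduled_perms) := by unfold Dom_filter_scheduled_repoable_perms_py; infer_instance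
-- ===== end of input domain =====

-- B replaces A's partition-then-lookup helper by one direct shape-classifying comprehension; same return value.
-- ===== PORT A =====
-- perm.split(":") — shared primitive used by both Pythons (PySem.Chars.splitOn is exact for a nonempty separator)
def pvSplitColon (s : String) : List String :=
  (PySem.Chars.splitOn s.toList [':']).map String.ofList

-- port of _convert_repoed_service_to_sorted_perms_and_services
def convert_repoed_py (repoed_services : List String) : List String × List String :=
  let pair := repoed_services.foldl
    (fun (acc : PySem.Set String × PySem.Set String) entry =>
      if (pvSplitColon entry).length == 2 then (PySem.Set.add acc.1 entry, acc.2)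
      else (acc.1, PySem.Set.add acc.2 entry))
    ((PySem.Set.empty : PySem.Set String), (PySem.Set.empty : PySem.Set String))
  (PySem.List.sorted pair.1 (fun x => x) false, PySem.List.sorted pair.2 (fun x => x) false)

def filter_scheduled_repoable_perms_py (repoable_permissions : List String) (scheduled_perms : List String) : List String :=
  let scheduled := convert_repoed_py scheduled_perms
  -- perm.split(":")[0]: split always returns a nonempty list, so index 0 is headD
  let filtered := repoable_permissions.filter (fun perm =>
    scheduled.1.contains perm || scheduled.2.contains ((pvSplitColon perm).headD ""))
  PySem.List.sorted filtered (fun x => x) false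

-- ===== PORT B =====
def filter_scheduled_repoable_perms_py_alt (repoable_permissions : List String) (scheduled_perms : List String) : List String :=
  PySem.List.sorted
    (repoable_permissions.filter (fun perm =>
      scheduled_perms.contains ((pvSplitColon perm).headD "")
      || ((pvSplitColon perm).length == 2 && scheduled_perms.contains perm)))
    (fun x => x) false

-- ===== PRECONDITION & SPEC =====
def Spec_filter_scheduled_repoable_perms_py (repoable_permissions : List String) (scheduled_perms : List String) (out : List String) : Prop := out = filter_scheduled_repoable_perms_py_alt repoable_permissions scheduled_perms
instance (repoable_permissions : List String) (scheduled_perms : List String) (out : List String) : Decidable (Spec_filter_scheduled_repoable_perms_py repoable_permissions scheduled_perms out) := by unfold Spec_filter_scheduled_repoable_perms_py; infer_instance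

-- ===== CLAIM (what is proved, stated in full; the proofs are below) =====
def Claim_equal_filter_scheduled_repoable_perms_py : Prop := ∀ (repoable_permissions : List String) (scheduled_perms : List String), Dom_filter_scheduled_repoable_perms_py repoable_permissions scheduled_perms → Spec_filter_scheduled_repoable_perms_py repoable_permissions scheduled_perms (filter_scheduled_repoable_perms_py repoable_permissions scheduled_perms)

-- ===== LEMMAS AND PROOFS =====

-- reference splitter for a single-character separator
def pvSplit1 (c : Char) : List Char → List (List Char)
  | [] => [[]]
  | x :: rest =>
    if x = c then [] :: pvSplit1 c rest
    else
      match pvSplit1 c rest with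
      | [] => [[x]]
      | h :: t => (x :: h) :: t

def pvConsFirst (p : List Char) : List (List Char) → List (List Char)
  | [] => [p]
  | h :: t => (p ++ h) :: t

theorem pvSplit1_ne_nil (c : Char) (s : List Char) : pvSplit1 c s ≠ [] := by
  cases s with
  | nil => simp [pvSplit1]
  | cons x rest =>
    simp only [pvSplit1]
    split
    · simp
    · cases h : pvSplit1 c rest <;> simp

theorem pvGo_single (c : Char) : ∀ (fuel : Nat) (l cur acc : _), l.length ≤ fuel →
    PySem.Chars.splitOn.go [c] fuel l cur acc = acc.reverse ++ pvConsFirst cur.reverse (pvSplit1 c l) := by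
  intro fuel
  induction fuel with
  | zero =>
    intro l cur acc h
    have : l = [] := List.eq_nil_of_length_eq_zero (Nat.le_zero.mp h)
    subst this
    simp [PySem.Chars.splitOn.go, pvSplit1, pvConsFirst]
  | succ n ih =>
    intro l cur acc h
    cases l with
    | nil => simp [PySem.Chars.splitOn.go, pvSplit1, pvConsFirst]
    | cons x rest =>
      simp only [PySem.Chars.splitOn.go, List.isPrefixOf, Bool.and_true]
      by_cases hx : c = x
      · subst hx
        simp only [beq_self_eq_true, if_pos, List.length_cons, List.length_nil,
          List.drop_succ_cons, List.drop_zero]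
        rw [ih rest [] (cur.reverse :: acc) (by simpa using Nat.lt_succ_iff.mp (by simpa using h))]
        simp only [pvSplit1, ite_true]
        cases h1 : pvSplit1 c rest with
        | nil => exact absurd h1 (pvSplit1_ne_nil c rest)
        | cons a b => simp [pvConsFirst]
      · have hbe : (c == x) = false := by simp [hx]
        simp only [hbe, Bool.false_eq_true, ite_false]
        rw [ih rest (x :: cur) acc (by simpa using Nat.lt_succ_iff.mp (by simpa using h))]
        simp only [pvSplit1, if_neg (Ne.symm hx)]
        cases h1 : pvSplit1 c rest with
        | nil => exact absurd h1 (pvSplit1_ne_nil c rest)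
        | cons a b => simp [pvConsFirst]

theorem pvSplitOn_single (c : Char) (l : List Char) :
    PySem.Chars.splitOn l [c] = pvSplit1 c l := by
  unfold PySem.Chars.splitOn
  rw [pvGo_single c (l.length + 1) l [] [] (Nat.le_succ _)]
  cases h1 : pvSplit1 c l with
  | nil => exact absurd h1 (pvSplit1_ne_nil c l)
  | cons a b => simp [pvConsFirst]

theorem pvSplit1_head (c : Char) (s : List Char) :
    (pvSplit1 c s).headD [] = s.takeWhile (fun x => !(x == c)) := by
  induction s with
  | nil => simp [pvSplit1]
  | cons x rest ih =>
    simp only [pvSplit1, List.takeWhile]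
    by_cases hx : x = c
    · subst hx; simp
    · have hbe : (x == c) = false := by simp [hx]
      simp only [if_neg hx, hbe, Bool.not_false]
      cases h1 : pvSplit1 c rest with
      | nil => exact absurd h1 (pvSplit1_ne_nil c rest)
      | cons a b =>
        rw [h1] at ih
        simp only [List.headD_cons] at ih ⊢
        rw [ih]

theorem pvSplit1_of_not_mem (c : Char) (s : List Char) (h : c ∉ s) : pvSplit1 c s = [s] := by
  induction s with
  | nil => simp [pvSplit1]
  | cons x rest ih =>
    have hx : x ≠ c := fun hh => h (by simp [hh])
    have hr := ih (fun hh => h (List.mem_cons_of_mem _ hh))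
    simp [pvSplit1, if_neg hx, hr]

-- the first piece of s.split(":") contains no colon, so splitting it again yields one piece
theorem pvHead_split_len (s : String) :
    (pvSplitColon ((pvSplitColon s).headD "")).length = 1 := by
  have hhead : (pvSplitColon s).headD "" = String.ofList (s.toList.takeWhile (fun x => !(x == ':'))) := by
    unfold pvSplitColon
    rw [pvSplitOn_single]
    cases h1 : pvSplit1 ':' s.toList with
    | nil => exact absurd h1 (pvSplit1_ne_nil _ _)
    | cons a b =>
      have hh := pvSplit1_head ':' s.toList
      rw [h1] at hh
      simp only [List.headD_cons] at hh
      simp [hh]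
  rw [hhead]
  have hnm : (':' : Char) ∉ s.toList.takeWhile (fun x => !(x == ':')) := by
    intro hmem
    have := List.mem_takeWhile_imp hmem
    simp at this
  unfold pvSplitColon
  have ht : (String.ofList (s.toList.takeWhile (fun x => !(x == ':')))).toList
      = s.toList.takeWhile (fun x => !(x == ':')) := by simp
  rw [ht, pvSplitOn_single, pvSplit1_of_not_mem ':' _ hnm]
  simp

-- invariant of A's partitioning fold
theorem pvConvert_mem (S : List String) : ∀ (s0 s1 : PySem.Set String) (x : String),
    (x ∈ (S.foldl
        (fun (acc : PySem.Set String × PySem.Set String) entry =>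
          if (pvSplitColon entry).length == 2 then (PySem.Set.add acc.1 entry, acc.2)
          else (acc.1, PySem.Set.add acc.2 entry)) (s0, s1)).1
      ↔ x ∈ s0 ∨ (x ∈ S ∧ (pvSplitColon x).length = 2)) ∧
    (x ∈ (S.foldl
        (fun (acc : PySem.Set String × PySem.Set String) entry =>
          if (pvSplitColon entry).length == 2 then (PySem.Set.add acc.1 entry, acc.2)
          else (acc.1, PySem.Set.add acc.2 entry)) (s0, s1)).2
      ↔ x ∈ s1 ∨ (x ∈ S ∧ (pvSplitColon x).length ≠ 2)) := by
  induction S with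
  | nil => intro s0 s1 x; simp
  | cons e rest ih =>
    intro s0 s1 x
    simp only [List.foldl_cons]
    by_cases he : (pvSplitColon e).length = 2
    · have hbe : ((pvSplitColon e).length == 2) = true := by simpa using he
      simp only [hbe, if_true]
      have h2 := ih (PySem.Set.add s0 e) s1 x
      constructor
      · rw [h2.1, PySem.Set.mem_add]
        constructor
        · rintro ((h | h) | ⟨h, h3⟩)
          · exact Or.inl h
          · exact Or.inr ⟨by simp [h], by rw [h]; exact he⟩
          · exact Or.inr ⟨List.mem_cons_of_mem _ h, h3⟩
        · rintro (h | ⟨h, h3⟩)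
          · exact Or.inl (Or.inl h)
          · rcases List.mem_cons.mp h with h | h
            · exact Or.inl (Or.inr h)
            · exact Or.inr ⟨h, h3⟩
      · rw [h2.2]
        constructor
        · rintro (h | ⟨h, h3⟩)
          · exact Or.inl h
          · exact Or.inr ⟨List.mem_cons_of_mem _ h, h3⟩
        · rintro (h | ⟨h, h3⟩)
          · exact Or.inl h
          · rcases List.mem_cons.mp h with h | h
            · exact absurd (h ▸ he) h3
            · exact Or.inr ⟨h, h3⟩
    · have hbe : ((pvSplitColon e).length == 2) = false := by simpa using he
      simp only [hbe, Bool.false_eq_true, if_false]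
      have h2 := ih s0 (PySem.Set.add s1 e) x
      constructor
      · rw [h2.1]
        constructor
        · rintro (h | ⟨h, h3⟩)
          · exact Or.inl h
          · exact Or.inr ⟨List.mem_cons_of_mem _ h, h3⟩
        · rintro (h | ⟨h, h3⟩)
          · exact Or.inl h
          · rcases List.mem_cons.mp h with h | h
            · exact absurd (h ▸ h3) he
            · exact Or.inr ⟨h, h3⟩
      · rw [h2.2, PySem.Set.mem_add]
        constructor
        · rintro ((h | h) | ⟨h, h3⟩)
          · exact Or.inl h
          · exact Or.inr ⟨by simp [h], by rw [h]; exact he⟩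
          · exact Or.inr ⟨List.mem_cons_of_mem _ h, h3⟩
        · rintro (h | ⟨h, h3⟩)
          · exact Or.inl (Or.inl h)
          · rcases List.mem_cons.mp h with h | h
            · exact Or.inl (Or.inr h)
            · exact Or.inr ⟨h, h3⟩

-- the two per-element tests agree
theorem pvTest_eq (scheduled : List String) (perm : String) :
    ((convert_repoed_py scheduled).1.contains perm
      || (convert_repoed_py scheduled).2.contains ((pvSplitColon perm).headD ""))
    = (scheduled.contains ((pvSplitColon perm).headD "")
      || ((pvSplitColon perm).length == 2 && scheduled.contains perm)) := by
  have hmem := pvConvert_mem scheduled PySem.Set.empty PySem.Set.empty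
  simp only [beq_iff_eq] at hmem
  rw [Bool.eq_iff_iff]
  simp only [Bool.or_eq_true, Bool.and_eq_true, List.contains_iff_mem, beq_iff_eq,
    convert_repoed_py, PySem.List.mem_sorted]
  rw [(hmem perm).1, (hmem ((pvSplitColon perm).headD "")).2]
  have hlen := pvHead_split_len perm
  constructor
  · rintro ((h | h) | (h | ⟨h, h3⟩))
    · exact absurd h (by simp [PySem.Set.empty])
    · exact Or.inr ⟨h.2, h.1⟩
    · exact absurd h (by simp [PySem.Set.empty])
    · exact Or.inl h
  · rintro (h | ⟨h1, h2⟩)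
    · exact Or.inr (Or.inr ⟨h, by omega⟩)
    · exact Or.inl (Or.inr ⟨h2, h1⟩)

-- ===== VERDICT (by name: the statement is the Claim_ definition above) =====
theorem filter_scheduled_repoable_perms_py_spec : Claim_equal_filter_scheduled_repoable_perms_py := by
  intro repoable scheduled _
  unfold Spec_filter_scheduled_repoable_perms_py
  unfold filter_scheduled_repoable_perms_py filter_scheduled_repoable_perms_py_alt
  simp only []
  congr 1
  apply List.filter_congr
  intro perm _
  rw [pvTest_eq]
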